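-- pv_equiv track=rewrite | github.com/EugeneGorbulya/hse_project_spotify | main.py | get_year_stats
-- ===== SOURCE A (Python) =====
-- from typing import List, Dict
--
-- def get_year_stats(table: List) -> Dict:
--     d = dict()
--     for el in table:
--         if el[1] in d:
--             d[el[1]]+=1
--         else:
--             d[el[1]] = 1
--     return d
-- ===== SOURCE B (Python) =====
-- def get_year_stats(table):
--     keys = [el[1] for el in table]
--     return {k: keys.count(k) for k in dict.fromkeys(keys)}
-- ===== Notes on version B (the rewrite author's own statement) =====
-- stated objective: simpler
-- what changed: Replaces the single-pass if/else hash-map accumulation with a two-pass decomposition: extract the key column, order-preserving dedup via dict.fromkeys, then a dict comprehension pairing each distinct key with keys.count(k).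
import Mathlib
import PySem

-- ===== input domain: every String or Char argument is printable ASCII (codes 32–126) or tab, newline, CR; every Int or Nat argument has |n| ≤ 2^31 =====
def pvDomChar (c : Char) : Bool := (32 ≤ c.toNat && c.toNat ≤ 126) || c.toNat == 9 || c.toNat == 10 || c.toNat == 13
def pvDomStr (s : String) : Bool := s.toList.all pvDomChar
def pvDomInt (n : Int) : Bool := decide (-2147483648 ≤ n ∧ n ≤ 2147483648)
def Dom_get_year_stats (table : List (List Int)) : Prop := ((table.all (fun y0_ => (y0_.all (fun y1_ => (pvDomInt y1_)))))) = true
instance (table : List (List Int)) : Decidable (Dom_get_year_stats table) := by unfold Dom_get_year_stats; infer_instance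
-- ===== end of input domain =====

-- B replaces A's single-pass if/else dict accumulation with a two-pass decomposition
-- (dedup the key column, then pair each distinct key with its count); alternative, not faster.


-- ===== PORT A =====
def get_year_stats (table : List (List Int)) : List (Int × Int) :=
  (table.foldl (fun d el =>
      match PySem.List.pyGet? el 1 with
      | none => d  -- dead under Pre_ (Python raises IndexError here)
      | some k => if d.contains k then d.insert k (d.getD k 0 + 1) else d.insert k 1)
    PySem.Dict.empty).items

-- ===== PORT B =====
def get_year_stats_alt (table : List (List Int)) : List (Int × Int) :=
  let keys := table.map (fun el => (PySem.List.pyGet? el 1).getD 0)  -- getD 0 dead under Pre_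
  ((PySem.List.dedup keys).foldl
      (fun d k => d.insert k ((keys.count k : Int))) PySem.Dict.empty).items

-- ===== PRECONDITION & SPEC =====
-- Pre_ excludes exactly the rows of length < 2, on which Python's el[1] raises IndexError.
def Pre_get_year_stats (table : List (List Int)) : Prop := ∀ el ∈ table, 2 ≤ el.length
instance (table : List (List Int)) : Decidable (Pre_get_year_stats table) := by unfold Pre_get_year_stats; infer_instance
def pvWitness_get_year_stats : List (List Int) := [[1, 2000], [2, 1999], [3, 2000]]
def Spec_get_year_stats (table : List (List Int)) (out : List (Int × Int)) : Prop := out = get_year_stats_alt table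
instance (table : List (List Int)) (out : List (Int × Int)) : Decidable (Spec_get_year_stats table out) := by unfold Spec_get_year_stats; infer_instance

-- ===== CLAIM (what is proved, stated in full; the proofs are below) =====
def Claim_equal_get_year_stats : Prop := ∀ (table : List (List Int)), Dom_get_year_stats table → Pre_get_year_stats table → Spec_get_year_stats table (get_year_stats table)

-- ===== LEMMAS AND PROOFS =====

-- Under Pre_, A's loop over the table is exactly Counter(keys) of the key column.
lemma getA_eq_counter (table : List (List Int)) (d : PySem.Dict Int Int)
    (h : Pre_get_year_stats table) :
    table.foldl (fun d el =>
      match PySem.List.pyGet? el 1 with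
      | none => d
      | some k => if d.contains k then d.insert k (d.getD k 0 + 1) else d.insert k 1) d
    = (table.map (fun el => (PySem.List.pyGet? el 1).getD 0)).foldl
        (fun d x => d.insert x (d.getD x 0 + 1)) d := by
  induction table generalizing d with
  | nil => rfl
  | cons el rest ih =>
    have hel : 2 ≤ el.length := h el (by simp)
    have hk : PySem.List.pyGet? el 1 = some el[1] := by
      simpa using PySem.List.pyGet?_ofNat el 1 (by omega)
    simp only [List.foldl_cons, List.map_cons, hk, Option.getD_some]
    rw [ih _ (fun e he => h e (by simp [he]))]
    congr 1
    by_cases hc : d.contains el[1]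
    · simp [hc]
    · have hcf : d.contains el[1] = false := by simpa using hc
      simp [hcf, PySem.Dict.getD_of_not_contains d 0 hcf]

lemma dedup_eq_set_ofList (xs : List Int) : PySem.List.dedup xs = PySem.Set.ofList xs := by
  rfl

-- B's dict comprehension over the deduped keys, characterised as a map.
lemma alt_eq_map (table : List (List Int)) :
    get_year_stats_alt table =
      (PySem.Set.ofList (table.map (fun el => (PySem.List.pyGet? el 1).getD 0))).map
        (fun k => (k, ((table.map (fun el => (PySem.List.pyGet? el 1).getD 0)).count k : Int))) := by
  unfold get_year_stats_alt
  simp only [dedup_eq_set_ofList]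
  rw [PySem.Dict.items_foldl_insert_fresh _ (fun a => a)
        (fun k => ((table.map (fun el => (PySem.List.pyGet? el 1).getD 0)).count k : Int))
        PySem.Dict.empty
        (by intro a _; exact PySem.Dict.contains_empty a)
        (by simpa using PySem.Set.nodup_ofList _)]
  simp [PySem.Dict.empty]

-- ===== VERDICT (by name: the statement is the Claim_ definition above) =====
theorem get_year_stats_spec : Claim_equal_get_year_stats := by
  intro table _hdom hpre
  unfold Spec_get_year_stats get_year_stats
  rw [getA_eq_counter table _ hpre, PySem.Dict.foldl_insert_getD_add_one_eq_counter,
      PySem.Dict.items_counter, alt_eq_map]
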